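-- pv_equiv track=rewrite | github.com/rlgraf/Autonomous_Robot | ros_package_sniffer.py | group_python_nodes
-- ===== SOURCE A (Python) =====
-- def group_python_nodes(py_nodes):
--     groups = {
--         "battery_behavior": [],
--         "people_behavior": [],
--         "supervisor": [],
--         "other": [],
--     }
--
--     for node in py_nodes:
--         p = node["path"]
--         if "battery_behavior" in p:
--             groups["battery_behavior"].append(node)
--         elif "people_behavior" in p:
--             groups["people_behavior"].append(node)
--         elif "supervisor" in p:
--             groups["supervisor"].append(node)
--         else:
--             groups["other"].append(node)
--
--     return groups
-- ===== SOURCE B (Python) =====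
-- def group_python_nodes(py_nodes):
--     rules = [("battery_behavior", "battery_behavior"),
--              ("people_behavior", "people_behavior"),
--              ("supervisor", "supervisor")]
--
--     def category(node):
--         p = node["path"]
--         return next((name for name, sub in rules if sub in p), "other")
--
--     return {name: [n for n in py_nodes if category(n) == name]
--             for name in ("battery_behavior", "people_behavior", "supervisor", "other")}
-- ===== Notes on version B (the rewrite author's own statement) =====
-- stated objective: idiomatic
-- what changed: Replaces the single-pass if/elif dict-mutation loop with a data-driven ordered rules table plus a dict comprehension that builds each category by filtering the node list per category name.
import Mathlib
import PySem

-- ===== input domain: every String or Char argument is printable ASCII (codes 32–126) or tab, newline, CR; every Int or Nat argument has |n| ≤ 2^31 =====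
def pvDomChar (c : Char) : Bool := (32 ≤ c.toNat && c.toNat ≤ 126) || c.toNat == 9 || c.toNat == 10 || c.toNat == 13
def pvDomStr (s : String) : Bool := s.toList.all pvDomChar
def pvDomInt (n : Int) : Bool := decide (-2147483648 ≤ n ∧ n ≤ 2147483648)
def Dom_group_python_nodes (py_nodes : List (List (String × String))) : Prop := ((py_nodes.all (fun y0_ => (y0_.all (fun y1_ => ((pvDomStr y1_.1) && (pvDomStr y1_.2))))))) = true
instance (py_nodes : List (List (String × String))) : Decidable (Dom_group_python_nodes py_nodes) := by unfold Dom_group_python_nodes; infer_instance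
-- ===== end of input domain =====

-- B replaces the if/elif dict-mutation loop with an ordered rules table and a per-category
-- filter comprehension (objective: idiomatic, data-driven classification); same return value.
-- ===== PORT A =====
-- the loop body of A, named (node["path"]: under Pre_ every node contains "path", so getD "" is the lookup)
def pvStepA (g : PySem.Dict String (List (List (String × String)))) (node : List (String × String)) :
    PySem.Dict String (List (List (String × String))) :=
  let p := (PySem.Dict.mk node).getD "path" ""
  if PySem.Str.isIn "battery_behavior" p then g.modify "battery_behavior" [] (· ++ [node])
  else if PySem.Str.isIn "people_behavior" p then g.modify "people_behavior" [] (· ++ [node])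
  else if PySem.Str.isIn "supervisor" p then g.modify "supervisor" [] (· ++ [node])
  else g.modify "other" [] (· ++ [node])
def group_python_nodes (py_nodes : List (List (String × String))) : List (String × List (List (String × String))) :=
  let groups : PySem.Dict String (List (List (String × String))) :=
    PySem.Dict.ofList [("battery_behavior", []), ("people_behavior", []), ("supervisor", []), ("other", [])]
  let groups := py_nodes.foldl pvStepA groups
  groups.items
-- ===== PORT B =====
def pyRules : List (String × String) :=
  [("battery_behavior", "battery_behavior"), ("people_behavior", "people_behavior"), ("supervisor", "supervisor")]
def pyCategory (node : List (String × String)) : String :=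
  let p := (PySem.Dict.mk node).getD "path" ""
  (((pyRules.find? (fun r => PySem.Str.isIn r.2 p)).map (·.1))).getD "other"
def group_python_nodes_alt (py_nodes : List (List (String × String))) : List (String × List (List (String × String))) :=
  (PySem.Dict.ofList (["battery_behavior", "people_behavior", "supervisor", "other"].map
     (fun name => (name, py_nodes.filter (fun n => pyCategory n == name))))).items
-- ===== PRECONDITION & SPEC =====
-- Pre_ excludes exactly the inputs on which Python raises KeyError: a node dict without key "path".
def Pre_group_python_nodes (py_nodes : List (List (String × String))) : Prop :=
  (py_nodes.all (fun node => (PySem.Dict.mk node).contains "path")) = true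
instance (py_nodes : List (List (String × String))) : Decidable (Pre_group_python_nodes py_nodes) := by
  unfold Pre_group_python_nodes; infer_instance
def pvWitness_group_python_nodes : (List (List (String × String))) :=
  [[("path", "/home/robot/battery_behavior/node.py")], [("path", "misc/tool.py"), ("name", "t")]]
def Spec_group_python_nodes (py_nodes : List (List (String × String))) (out : List (String × List (List (String × String)))) : Prop := out = group_python_nodes_alt py_nodes
instance (py_nodes : List (List (String × String))) (out : List (String × List (List (String × String)))) : Decidable (Spec_group_python_nodes py_nodes out) := by unfold Spec_group_python_nodes; infer_instance
-- ===== CLAIM (what is proved, stated in full; the proofs are below) =====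
def Claim_equal_group_python_nodes : Prop := ∀ (py_nodes : List (List (String × String))), Dom_group_python_nodes py_nodes → Pre_group_python_nodes py_nodes → Spec_group_python_nodes py_nodes (group_python_nodes py_nodes)
-- ===== LEMMAS AND PROOFS =====
def pvPath (node : List (String × String)) : String := (PySem.Dict.mk node).getD "path" ""
def pvIsB (n : List (String × String)) : Bool := PySem.Str.isIn "battery_behavior" (pvPath n)
def pvIsP (n : List (String × String)) : Bool := !pvIsB n && PySem.Str.isIn "people_behavior" (pvPath n)
def pvIsS (n : List (String × String)) : Bool :=
  !pvIsB n && !PySem.Str.isIn "people_behavior" (pvPath n) && PySem.Str.isIn "supervisor" (pvPath n)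
def pvIsO (n : List (String × String)) : Bool :=
  !pvIsB n && !PySem.Str.isIn "people_behavior" (pvPath n) && !PySem.Str.isIn "supervisor" (pvPath n)
-- pvStepA on the four-key dict: one branch per category.
lemma pv_stepB (n : List (String × String)) (a b c d : List (List (String × String)))
    (hB : PySem.Str.isIn "battery_behavior" (pvPath n) = true) :
    pvStepA (PySem.Dict.mk [("battery_behavior", a), ("people_behavior", b), ("supervisor", c), ("other", d)]) n
    = PySem.Dict.mk [("battery_behavior", a ++ [n]), ("people_behavior", b), ("supervisor", c), ("other", d)] := by
  unfold pvPath at hB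
  unfold pvStepA
  rw [if_pos hB]
  simp [PySem.Dict.modify, PySem.Dict.getD, PySem.Dict.get?, PySem.Dict.insert, PySem.Dict.contains]
lemma pv_stepP (n : List (String × String)) (a b c d : List (List (String × String)))
    (hB : PySem.Str.isIn "battery_behavior" (pvPath n) = false)
    (hP : PySem.Str.isIn "people_behavior" (pvPath n) = true) :
    pvStepA (PySem.Dict.mk [("battery_behavior", a), ("people_behavior", b), ("supervisor", c), ("other", d)]) n
    = PySem.Dict.mk [("battery_behavior", a), ("people_behavior", b ++ [n]), ("supervisor", c), ("other", d)] := by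
  unfold pvPath at hB hP
  unfold pvStepA
  rw [if_neg (by rw [hB]; simp), if_pos hP]
  simp [PySem.Dict.modify, PySem.Dict.getD, PySem.Dict.get?, PySem.Dict.insert, PySem.Dict.contains]
lemma pv_stepS (n : List (String × String)) (a b c d : List (List (String × String)))
    (hB : PySem.Str.isIn "battery_behavior" (pvPath n) = false)
    (hP : PySem.Str.isIn "people_behavior" (pvPath n) = false)
    (hS : PySem.Str.isIn "supervisor" (pvPath n) = true) :
    pvStepA (PySem.Dict.mk [("battery_behavior", a), ("people_behavior", b), ("supervisor", c), ("other", d)]) n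
    = PySem.Dict.mk [("battery_behavior", a), ("people_behavior", b), ("supervisor", c ++ [n]), ("other", d)] := by
  unfold pvPath at hB hP hS
  unfold pvStepA
  rw [if_neg (by rw [hB]; simp), if_neg (by rw [hP]; simp), if_pos hS]
  simp [PySem.Dict.modify, PySem.Dict.getD, PySem.Dict.get?, PySem.Dict.insert, PySem.Dict.contains]
lemma pv_stepO (n : List (String × String)) (a b c d : List (List (String × String)))
    (hB : PySem.Str.isIn "battery_behavior" (pvPath n) = false)
    (hP : PySem.Str.isIn "people_behavior" (pvPath n) = false)
    (hS : PySem.Str.isIn "supervisor" (pvPath n) = false) :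
    pvStepA (PySem.Dict.mk [("battery_behavior", a), ("people_behavior", b), ("supervisor", c), ("other", d)]) n
    = PySem.Dict.mk [("battery_behavior", a), ("people_behavior", b), ("supervisor", c), ("other", d ++ [n])] := by
  unfold pvPath at hB hP hS
  unfold pvStepA
  rw [if_neg (by rw [hB]; simp), if_neg (by rw [hP]; simp), if_neg (by rw [hS]; simp)]
  simp [PySem.Dict.modify, PySem.Dict.getD, PySem.Dict.get?, PySem.Dict.insert, PySem.Dict.contains]
-- A's loop, characterised: folding over l appends each node to the first matching category.
lemma pv_foldA (l : List (List (String × String)))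
    (a b c d : List (List (String × String))) :
    (l.foldl pvStepA
      (PySem.Dict.mk [("battery_behavior", a), ("people_behavior", b), ("supervisor", c), ("other", d)])).items
    = [("battery_behavior", a ++ l.filter pvIsB), ("people_behavior", b ++ l.filter pvIsP),
       ("supervisor", c ++ l.filter pvIsS), ("other", d ++ l.filter pvIsO)] := by
  induction l generalizing a b c d with
  | nil => simp
  | cons n t ih =>
    rw [List.foldl_cons]
    cases hB : PySem.Str.isIn "battery_behavior" (pvPath n) with
    | true =>
      rw [pv_stepB n a b c d hB, ih]
      simp only [List.filter_cons, pvIsB, pvIsP, pvIsS, pvIsO, hB]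
      simp
    | false =>
      cases hP : PySem.Str.isIn "people_behavior" (pvPath n) with
      | true =>
        rw [pv_stepP n a b c d hB hP, ih]
        simp only [List.filter_cons, pvIsB, pvIsP, pvIsS, pvIsO, hB, hP]
        simp
      | false =>
        cases hS : PySem.Str.isIn "supervisor" (pvPath n) with
        | true =>
          rw [pv_stepS n a b c d hB hP hS, ih]
          simp only [List.filter_cons, pvIsB, pvIsP, pvIsS, pvIsO, hB, hP, hS]
          simp
        | false =>
          rw [pv_stepO n a b c d hB hP hS, ih]
          simp only [List.filter_cons, pvIsB, pvIsP, pvIsS, pvIsO, hB, hP, hS]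
          simp
-- B's classifier agrees with A's branch predicates, category by category.
lemma pv_catB (n : List (String × String)) : (pyCategory n == "battery_behavior") = pvIsB n := by
  simp only [pyCategory, pyRules, List.find?, pvIsB, pvPath]
  cases hB : PySem.Str.isIn "battery_behavior" ((PySem.Dict.mk n).getD "path" "") <;>
    cases hP : PySem.Str.isIn "people_behavior" ((PySem.Dict.mk n).getD "path" "") <;>
      cases hS : PySem.Str.isIn "supervisor" ((PySem.Dict.mk n).getD "path" "") <;> simp
lemma pv_catP (n : List (String × String)) : (pyCategory n == "people_behavior") = pvIsP n := by
  simp only [pyCategory, pyRules, List.find?, pvIsP, pvIsB, pvPath]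
  cases hB : PySem.Str.isIn "battery_behavior" ((PySem.Dict.mk n).getD "path" "") <;>
    cases hP : PySem.Str.isIn "people_behavior" ((PySem.Dict.mk n).getD "path" "") <;>
      cases hS : PySem.Str.isIn "supervisor" ((PySem.Dict.mk n).getD "path" "") <;> simp
lemma pv_catS (n : List (String × String)) : (pyCategory n == "supervisor") = pvIsS n := by
  simp only [pyCategory, pyRules, List.find?, pvIsS, pvIsB, pvPath]
  cases hB : PySem.Str.isIn "battery_behavior" ((PySem.Dict.mk n).getD "path" "") <;>
    cases hP : PySem.Str.isIn "people_behavior" ((PySem.Dict.mk n).getD "path" "") <;>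
      cases hS : PySem.Str.isIn "supervisor" ((PySem.Dict.mk n).getD "path" "") <;> simp
lemma pv_catO (n : List (String × String)) : (pyCategory n == "other") = pvIsO n := by
  simp only [pyCategory, pyRules, List.find?, pvIsO, pvIsB, pvPath]
  cases hB : PySem.Str.isIn "battery_behavior" ((PySem.Dict.mk n).getD "path" "") <;>
    cases hP : PySem.Str.isIn "people_behavior" ((PySem.Dict.mk n).getD "path" "") <;>
      cases hS : PySem.Str.isIn "supervisor" ((PySem.Dict.mk n).getD "path" "") <;> simp
-- ===== VERDICT (by name: the statement is the Claim_ definition above) =====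
theorem group_python_nodes_spec : Claim_equal_group_python_nodes := by
  intro py_nodes _ _
  show group_python_nodes py_nodes = group_python_nodes_alt py_nodes
  rw [group_python_nodes, group_python_nodes_alt]
  rw [show PySem.Dict.ofList [("battery_behavior", ([] : List (List (String × String)))), ("people_behavior", []), ("supervisor", []), ("other", [])]
      = PySem.Dict.mk [("battery_behavior", []), ("people_behavior", []), ("supervisor", []), ("other", [])] from rfl]
  rw [pv_foldA]
  simp only [List.map_cons, List.map_nil]
  rw [show ∀ (w x y z : List (List (String × String))),
      PySem.Dict.ofList [("battery_behavior", w), ("people_behavior", x), ("supervisor", y), ("other", z)]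
      = PySem.Dict.mk [("battery_behavior", w), ("people_behavior", x), ("supervisor", y), ("other", z)] from by
        intro w x y z
        simp [PySem.Dict.ofList, PySem.Dict.update, PySem.Dict.insert, PySem.Dict.empty, PySem.Dict.contains]]
  rw [List.filter_congr (fun n _ => pv_catB n), List.filter_congr (fun n _ => pv_catP n),
      List.filter_congr (fun n _ => pv_catS n), List.filter_congr (fun n _ => pv_catO n)]
  simp
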